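-- pv_equiv track=rewrite | github.com/xai770/republic_of_love | modules/ty_report_base/qa/enhanced_qa_checker.py | _is_repetitive_content
-- ===== SOURCE A (Python) =====
-- from typing import List, Dict, Any, Set
--
-- def _is_repetitive_content(content: str) -> bool:
--     """Check if content appears repetitive"""
--     # Simple check for repeated phrases
--     sentences = content.split('.')
--     if len(sentences) < 2:
--         return False
--
--     sentence_counts: Dict[str, int] = {}
--     for sentence in sentences:
--         clean_sentence = sentence.strip().lower()
--         if clean_sentence:
--             sentence_counts[clean_sentence] = sentence_counts.get(clean_sentence, 0) + 1
--
--     # Flag if any sentence appears more than twice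
--     return any(count > 2 for count in sentence_counts.values())
-- ===== SOURCE B (Python) =====
-- def _is_repetitive_content(content: str) -> bool:
--     """Check if content appears repetitive"""
--     sentences = content.split('.')
--     if len(sentences) < 2:
--         return False
--
--     cleaned = sorted(filter(None, (s.strip().lower() for s in sentences)))
--
--     # A sentence occurs more than twice iff the sorted list has a run of length 3
--     prev = None
--     run = 0
--     for s in cleaned:
--         if s == prev:
--             run += 1
--         else:
--             prev = s
--             run = 1
--         if run > 2:
--             return True
--     return False
-- ===== Notes on version B (the rewrite author's own statement) =====
-- stated objective: alternative
-- what changed: Replaces the dict-based per-sentence counting and scan over the counts with sorting the cleaned sentences and a single adjacency scan that returns True on the first run of three equal entries.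
import Mathlib
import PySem

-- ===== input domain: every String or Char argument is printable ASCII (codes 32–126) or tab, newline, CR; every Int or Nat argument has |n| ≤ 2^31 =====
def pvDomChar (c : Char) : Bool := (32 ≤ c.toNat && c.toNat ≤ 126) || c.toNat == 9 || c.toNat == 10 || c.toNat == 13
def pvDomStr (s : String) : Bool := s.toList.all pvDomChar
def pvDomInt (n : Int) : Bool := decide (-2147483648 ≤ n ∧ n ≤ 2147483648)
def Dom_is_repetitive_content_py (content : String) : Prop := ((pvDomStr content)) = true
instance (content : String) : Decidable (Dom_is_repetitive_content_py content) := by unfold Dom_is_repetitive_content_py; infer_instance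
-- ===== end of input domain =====

-- B replaces A's dict-based counting with sort-then-adjacency-run detection; alternative decomposition, not claimed faster.

-- ===== PORT A =====
def is_repetitive_content_py (content : String) : Bool :=
  let sentences := (PySem.Str.split? content ".").getD []
  if sentences.length < 2 then false
  else
    let sentence_counts :=
      sentences.foldl (fun d sentence =>
        let clean_sentence := PySem.Str.lower (PySem.Str.strip sentence)
        if clean_sentence ≠ "" then d.insert clean_sentence (d.getD clean_sentence 0 + 1) else d)
        (PySem.Dict.empty : PySem.Dict String Int)
    sentence_counts.values.any (fun count => decide (count > 2))

-- ===== PORT B =====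
-- run-length scan of the for-loop in Source B (prev, run are the loop state; early return = true)
def pvRunScan : List String → Option String → Nat → Bool
  | [], _, _ => false
  | s :: rest, prev, run =>
    let run' := if some s = prev then run + 1 else 1
    if run' > 2 then true else pvRunScan rest (some s) run'

def is_repetitive_content_py_alt (content : String) : Bool :=
  let sentences := (PySem.Str.split? content ".").getD []
  if sentences.length < 2 then false
  else
    let cleaned :=
      PySem.List.sorted
        ((sentences.map (fun s => PySem.Str.lower (PySem.Str.strip s))).filter (fun c => c ≠ ""))
        (fun x => x) false
    pvRunScan cleaned none 0

-- ===== PRECONDITION & SPEC =====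
def Spec_is_repetitive_content_py (content : String) (out : Bool) : Prop := out = is_repetitive_content_py_alt content
instance (content : String) (out : Bool) : Decidable (Spec_is_repetitive_content_py content out) := by unfold Spec_is_repetitive_content_py; infer_instance

-- ===== CLAIM (what is proved, stated in full; the proofs are below) =====
def Claim_equal_is_repetitive_content_py : Prop := ∀ (content : String), Dom_is_repetitive_content_py content → Spec_is_repetitive_content_py content (is_repetitive_content_py content)

-- ===== LEMMAS AND PROOFS =====

-- the A-side dict loop builds exactly the counter of the nonempty cleaned sentences,
-- so its any-over-values test says: some cleaned sentence occurs at least three times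
theorem pvA_any_iff (l : List String) :
    ((l.foldl (fun d sentence =>
        let clean_sentence := PySem.Str.lower (PySem.Str.strip sentence)
        if clean_sentence ≠ "" then d.insert clean_sentence (d.getD clean_sentence 0 + 1) else d)
        (PySem.Dict.empty : PySem.Dict String Int)).values.any (fun count => decide (count > 2)) = true)
    ↔ ∃ k ∈ (l.map (fun s => PySem.Str.lower (PySem.Str.strip s))).filter (fun c => c ≠ ""),
        3 ≤ ((l.map (fun s => PySem.Str.lower (PySem.Str.strip s))).filter (fun c => c ≠ "")).count k := by
  have hfold :
      (l.foldl (fun d sentence =>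
        let clean_sentence := PySem.Str.lower (PySem.Str.strip sentence)
        if clean_sentence ≠ "" then d.insert clean_sentence (d.getD clean_sentence 0 + 1) else d)
        (PySem.Dict.empty : PySem.Dict String Int))
      = PySem.Dict.counter ((l.map (fun s => PySem.Str.lower (PySem.Str.strip s))).filter (fun c => c ≠ "")) := by
    rw [← PySem.Dict.foldl_insert_getD_add_one_eq_counter, List.foldl_filter, List.foldl_map]
    simp only [decide_eq_true_eq]
  rw [hfold]
  set C := (l.map (fun s => PySem.Str.lower (PySem.Str.strip s))).filter (fun c => c ≠ "") with hC
  rw [PySem.Dict.values_eq_map_keys _ (PySem.Dict.nodup_keys_counter C) 0, PySem.Dict.keys_counter]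
  simp only [List.any_map, List.any_eq_true, Function.comp, PySem.Dict.getD_counter,
    PySem.Set.mem_ofList, decide_eq_true_eq]
  constructor
  · rintro ⟨k, hk, h2⟩; exact ⟨k, hk, by omega⟩
  · rintro ⟨k, hk, h3⟩; exact ⟨k, hk, by omega⟩

-- run-scan with a live previous element, on a sorted tail
theorem pvRunScan_some_iff (l : List String) (hp : l.Pairwise (· ≤ ·)) (p : String)
    (hle : ∀ x ∈ l, p ≤ x) (r : Nat) :
    pvRunScan l (some p) r = true ↔
      (3 ≤ r + l.count p ∧ 1 ≤ l.count p) ∨ ∃ x ∈ l, x ≠ p ∧ 3 ≤ l.count x := by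
  induction l generalizing p r with
  | nil => simp [pvRunScan]
  | cons x t ih =>
    rw [List.pairwise_cons] at hp
    obtain ⟨hx, hpt⟩ := hp
    by_cases hxp : x = p
    · subst hxp
      by_cases h3 : r + 1 > 2
      · simp only [pvRunScan, if_pos rfl, if_true, if_pos h3, true_iff]
        refine Or.inl ?_
        rw [List.count_cons_self]
        omega
      · simp only [pvRunScan, if_pos rfl, if_true, if_neg h3]
        rw [ih hpt x (fun y hy => hle y (List.mem_cons_of_mem _ hy)) (r+1)]
        constructor
        · rintro (⟨h1, h2⟩ | ⟨y, hy, hyx, hyc⟩)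
          · exact Or.inl ⟨by rw [List.count_cons_self]; omega, by rw [List.count_cons_self]; omega⟩
          · exact Or.inr ⟨y, List.mem_cons_of_mem _ hy, hyx, by have h := hyc; simp only [List.count_cons] at h ⊢; simp [hyx, Ne.symm hyx] at h ⊢; omega⟩
        · rintro (⟨h1, h2⟩ | ⟨y, hy, hyx, hyc⟩)
          · rw [List.count_cons_self] at h1
            exact Or.inl ⟨by omega, by omega⟩
          · rcases List.mem_cons.mp hy with rfl | hy'
            · exact absurd rfl hyx
            · exact Or.inr ⟨y, hy', hyx, by have h := hyc; simp only [List.count_cons] at h ⊢; simp [hyx, Ne.symm hyx] at h ⊢; omega⟩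
    · have hpx : p < x := lt_of_le_of_ne (hle x (List.mem_cons_self)) (fun h => hxp h.symm)
      have hpt' : ∀ y ∈ t, p < y := fun y hy => lt_of_lt_of_le hpx (hx y hy)
      have hcp : (x :: t).count p = 0 := by
        rw [List.count_eq_zero]
        intro hmem
        rcases List.mem_cons.mp hmem with rfl | hy'
        · exact hxp rfl
        · exact absurd rfl (ne_of_gt (hpt' p hy'))
      have hsx : (some x = some p) = False := by simp [hxp]
      simp only [pvRunScan, hsx, if_false, if_neg (by omega : ¬ (1 > 2))]
      rw [ih hpt x hx 1]
      rw [hcp]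
      constructor
      · rintro (⟨h1, h2⟩ | ⟨y, hy, hyx, hyc⟩)
        · exact Or.inr ⟨x, List.mem_cons_self, hxp, by rw [List.count_cons_self]; omega⟩
        · refine Or.inr ⟨y, List.mem_cons_of_mem _ hy, ne_of_gt (hpt' y hy), by have h := hyc; simp only [List.count_cons] at h ⊢; simp [hyx, Ne.symm hyx] at h ⊢; omega⟩
      · rintro (⟨h1, h2⟩ | ⟨y, hy, hyp, hyc⟩)
        · omega
        · rcases List.mem_cons.mp hy with rfl | hy'
          · rw [List.count_cons_self] at hyc
            exact Or.inl ⟨by omega, by omega⟩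
          · by_cases hyx : y = x
            · subst hyx
              rw [List.count_cons_self] at hyc
              exact Or.inl ⟨by omega, by omega⟩
            · exact Or.inr ⟨y, hy', hyx, by have h := hyc; simp only [List.count_cons] at h ⊢; simp [hyx, Ne.symm hyx] at h ⊢; omega⟩

-- the whole scan: a sorted list has a run of three iff some element occurs at least three times
theorem pvRunScan_none_iff (l : List String) (hp : l.Pairwise (· ≤ ·)) :
    pvRunScan l none 0 = true ↔ ∃ x ∈ l, 3 ≤ l.count x := by
  cases l with
  | nil => simp [pvRunScan]
  | cons x t =>
    rw [List.pairwise_cons] at hp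
    obtain ⟨hx, hpt⟩ := hp
    have : pvRunScan (x :: t) none 0 = pvRunScan t (some x) 1 := by
      simp [pvRunScan]
    rw [this, pvRunScan_some_iff t hpt x hx 1]
    constructor
    · rintro (⟨h1, h2⟩ | ⟨y, hy, hyx, hyc⟩)
      · exact ⟨x, List.mem_cons_self, by rw [List.count_cons_self]; omega⟩
      · exact ⟨y, List.mem_cons_of_mem _ hy, by have h := hyc; simp only [List.count_cons] at h ⊢; simp [hyx, Ne.symm hyx] at h ⊢; omega⟩
    · rintro ⟨y, hy, hyc⟩
      by_cases hyx : y = x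
      · subst hyx
        rw [List.count_cons_self] at hyc
        exact Or.inl ⟨by omega, by omega⟩
      · rcases List.mem_cons.mp hy with rfl | hy'
        · exact absurd rfl hyx
        · exact Or.inr ⟨y, hy', hyx, by have h := hyc; simp only [List.count_cons] at h ⊢; simp [hyx, Ne.symm hyx] at h ⊢; omega⟩

-- ===== VERDICT (by name: the statement is the Claim_ definition above) =====
theorem is_repetitive_content_py_spec : Claim_equal_is_repetitive_content_py := by
  intro content _
  unfold Spec_is_repetitive_content_py is_repetitive_content_py is_repetitive_content_py_alt
  set sentences := (PySem.Str.split? content ".").getD [] with hs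
  by_cases hlen : sentences.length < 2
  · simp [hlen]
  · simp only [if_neg hlen]
    set C := (sentences.map (fun s => PySem.Str.lower (PySem.Str.strip s))).filter (fun c => c ≠ "") with hC
    set S := PySem.List.sorted C (fun x => x) false with hS
    have hperm : S.Perm C := PySem.List.sorted_perm C (fun x => x) false
    rw [Bool.eq_iff_iff, pvA_any_iff sentences,
      pvRunScan_none_iff S (PySem.List.sorted_pairwise C (fun x => x))]
    constructor
    · rintro ⟨k, hk, h3⟩
      exact ⟨k, hperm.mem_iff.mpr hk, by rw [hperm.count_eq]; exact h3⟩
    · rintro ⟨k, hk, h3⟩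
      exact ⟨k, hperm.mem_iff.mp hk, by rw [← hperm.count_eq]; exact h3⟩
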